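-- pv_equiv track=rewrite | github.com/jinxx1/NewPythonCode | python_github/Python_script/rexTime.py | regFloat
-- ===== SOURCE A (Python) =====
-- def regFloat(word):
-- 	try:
-- 		a = filter(lambda ch: ch in '-0123456789.', str(word))
-- 		straa = ''.join([x for x in a])
-- 		nnmu = straa.count('.')
-- 		stra = straa.replace('.', '', nnmu - 1)
-- 	except:
-- 		stra = ''
-- 	return stra
-- ===== SOURCE B (Python) =====
-- def regFloat(word):
--     # One reverse streaming pass: keep digits/'-' always, keep only the first
--     # dot seen from the right (i.e. the last dot of the string).
--     out = []
--     seen_dot = False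
--     for ch in reversed(str(word)):
--         if ch in '-0123456789':
--             out.append(ch)
--         elif ch == '.' and not seen_dot:
--             out.append(ch)
--             seen_dot = True
--     return ''.join(reversed(out))
-- ===== Notes on version B (the rewrite author's own statement) =====
-- stated objective: alternative
-- what changed: Replaces A's three-phase pipeline (filter+join, count dots, replace first n-1 dots) by a single reverse streaming pass with a seen_dot flag that keeps the last dot directly.
import Mathlib
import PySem

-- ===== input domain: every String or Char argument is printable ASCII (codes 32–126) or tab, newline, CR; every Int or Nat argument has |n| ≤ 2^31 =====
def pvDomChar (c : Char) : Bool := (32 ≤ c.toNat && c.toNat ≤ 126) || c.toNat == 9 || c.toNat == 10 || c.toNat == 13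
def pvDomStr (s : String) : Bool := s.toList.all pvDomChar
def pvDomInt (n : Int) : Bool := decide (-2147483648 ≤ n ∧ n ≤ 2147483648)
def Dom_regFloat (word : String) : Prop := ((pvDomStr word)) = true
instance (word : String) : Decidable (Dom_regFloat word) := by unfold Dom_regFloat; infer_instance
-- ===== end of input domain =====

-- B replaces A's filter/count/replace pipeline by one reverse streaming pass with a seen_dot
-- flag (objective: alternative decomposition, same cost). A's try/except never fires for a
-- string argument, so both functions are total.

-- ===== PORT A =====
-- the string literal '-0123456789.' of A
def regFloatAllowed : List Char := "-0123456789.".toList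

-- hand port of straa.replace('.', '', k): removes the first k dots (k < 0 removes all);
-- exact because old is the single character '.' and new is '' (occurrences cannot overlap).
def regFloatRemoveDots : List Char → Int → List Char
  | [], _ => []
  | c :: cs, k =>
    if c = '.' ∧ k ≠ 0 then regFloatRemoveDots cs (k - 1)
    else c :: regFloatRemoveDots cs k

def regFloat (word : String) : String :=
  -- a = filter(lambda ch: ch in '-0123456789.', str(word));  straa = ''.join([x for x in a])
  let straa : List Char := word.toList.filter (fun ch => PySem.Chars.isIn [ch] regFloatAllowed)
  -- nnmu = straa.count('.')  — hand port: for the single-character needle '.' str.count is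
  -- exactly the number of '.' characters (single-char occurrences cannot overlap)
  let nnmu : Int := (straa.count '.' : Int)
  -- stra = straa.replace('.', '', nnmu - 1)
  String.ofList (regFloatRemoveDots straa (nnmu - 1))

-- ===== PORT B =====
-- the string literal '-0123456789' of B
def regFloatDigits : List Char := "-0123456789".toList

-- the loop body of Source B: state is (out, seen_dot)
def regFloatStep (s : List Char × Bool) (ch : Char) : List Char × Bool :=
  if PySem.Chars.isIn [ch] regFloatDigits then (s.1 ++ [ch], s.2)
  else if ch = '.' ∧ s.2 = false then (s.1 ++ [ch], true)
  else s

def regFloat_alt (word : String) : String :=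
  let st := word.toList.reverse.foldl regFloatStep ([], false)
  String.ofList st.1.reverse

-- ===== PRECONDITION & SPEC =====
def Spec_regFloat (word : String) (out : String) : Prop := out = regFloat_alt word
instance (word : String) (out : String) : Decidable (Spec_regFloat word out) := by unfold Spec_regFloat; infer_instance

-- ===== CLAIM (what is proved, stated in full; the proofs are below) =====
def Claim_equal_regFloat : Prop := ∀ (word : String), Dom_regFloat word → Spec_regFloat word (regFloat word)

-- ===== LEMMAS AND PROOFS =====

lemma isIn_single (c : Char) (s : List Char) :
    PySem.Chars.isIn [c] s = true ↔ c ∈ s := by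
  rw [PySem.Chars.isIn_iff_infix]
  constructor
  · intro h; exact h.mem (List.mem_singleton_self c)
  · intro h
    obtain ⟨l1, l2, rfl⟩ := List.append_of_mem h
    exact ⟨l1, l2, by simp⟩

lemma big_split : regFloatAllowed = regFloatDigits ++ ['.'] := by decide

lemma dot_not_digit : ('.' : Char) ∉ regFloatDigits := by decide

lemma isIn_dot_digits : PySem.Chars.isIn ['.'] regFloatDigits = false := by decide

lemma mem_big_iff (c : Char) : c ∈ regFloatAllowed ↔ c ∈ regFloatDigits ∨ c = '.' := by
  rw [big_split]; simp

lemma isIn_big_eq_digits (c : Char) (hd : c ≠ '.') :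
    PySem.Chars.isIn [c] regFloatAllowed = PySem.Chars.isIn [c] regFloatDigits := by
  rw [Bool.eq_iff_iff, isIn_single, isIn_single, mem_big_iff]
  simp [hd]

-- keep-only-the-last-dot, as forward recursion: a dot is kept iff no dot follows it
def ldk : List Char → List Char
  | [] => []
  | c :: cs => if c = '.' ∧ '.' ∈ cs then ldk cs else c :: ldk cs

-- recursive form of B's reverse scan
def bRev : List Char → Bool → List Char
  | [], _ => []
  | c :: cs, s =>
    if PySem.Chars.isIn [c] regFloatDigits then c :: bRev cs s
    else if c = '.' ∧ s = false then c :: bRev cs true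
    else bRev cs s

lemma foldl_step (l : List Char) (acc : List Char) (seen : Bool) :
    (l.foldl regFloatStep (acc, seen)).1 = acc ++ bRev l seen := by
  induction l generalizing acc seen with
  | nil => simp [bRev]
  | cons c cs ih =>
    simp only [List.foldl_cons, regFloatStep, bRev]
    by_cases h1 : PySem.Chars.isIn [c] regFloatDigits = true
    · rw [if_pos h1, if_pos h1, ih, List.append_assoc]; rfl
    · rw [if_neg h1, if_neg h1]
      by_cases h2 : c = '.' ∧ seen = false
      · rw [if_pos h2, if_pos h2, ih, List.append_assoc]; rfl
      · rw [if_neg h2, if_neg h2, ih]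

lemma removeDots_zero (l : List Char) : regFloatRemoveDots l 0 = l := by
  induction l with
  | nil => rfl
  | cons c cs ih => simp [regFloatRemoveDots, ih]

lemma ldk_no_dot (l : List Char) (h : ('.' : Char) ∉ l) : ldk l = l := by
  induction l with
  | nil => rfl
  | cons c cs ih =>
    simp only [List.mem_cons, not_or] at h
    simp only [ldk]
    rw [if_neg (fun hx => h.2 hx.2), ih h.2]

lemma removeDots_count (l : List Char) :
    regFloatRemoveDots l ((l.count '.' : Int) - 1) = ldk l := by
  induction l with
  | nil => rfl
  | cons c cs ih =>
    simp only [regFloatRemoveDots, ldk]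
    by_cases hc : c = '.'
    · subst hc
      by_cases hd : ('.' : Char) ∈ cs
      · have hpos : 0 < cs.count '.' := List.count_pos_iff.mpr hd
        have hcnt : ((('.' :: cs).count '.' : Int) - 1) = (cs.count '.' : Int) := by
          simp [List.count_cons_self]
        rw [hcnt]
        have hk : (cs.count '.' : Int) ≠ 0 := by omega
        rw [if_pos ⟨rfl, hk⟩, if_pos ⟨rfl, hd⟩]
        exact ih
      · have h0 : cs.count '.' = 0 := List.count_eq_zero.mpr hd
        have hk0 : ((('.' :: cs).count '.' : Int) - 1) = 0 := by
          simp [List.count_cons_self, h0]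
        rw [hk0]
        rw [if_neg (fun hx => hx.2 rfl), if_neg (fun hx => hd hx.2)]
        rw [removeDots_zero, ldk_no_dot cs hd]
    · have hcnt : (c :: cs).count '.' = cs.count '.' := by
        simp [hc]
      rw [hcnt, if_neg (fun hx => hc hx.1), if_neg (fun hx => hc hx.1), ih]

lemma bRev_true (l : List Char) :
    bRev l true = l.filter (fun c => PySem.Chars.isIn [c] regFloatDigits) := by
  induction l with
  | nil => rfl
  | cons c cs ih =>
    simp only [bRev, List.filter_cons]
    by_cases h1 : PySem.Chars.isIn [c] regFloatDigits = true
    · rw [if_pos h1, ih]; simp [h1]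
    · rw [if_neg h1, if_neg (fun hx => by simp at hx), ih]
      simp [Bool.not_eq_true] at h1
      simp [h1]

lemma ldk_append_nondot (l : List Char) (c : Char) (hc : c ≠ '.') :
    ldk (l ++ [c]) = ldk l ++ [c] := by
  induction l with
  | nil => simp only [List.nil_append, ldk]
           rw [if_neg (fun hx => hc hx.1)]
  | cons h t ih =>
    simp only [List.cons_append, ldk]
    by_cases hh : h = '.' ∧ ('.' : Char) ∈ t
    · have h' : h = '.' ∧ ('.' : Char) ∈ t ++ [c] := ⟨hh.1, by simp [hh.2]⟩
      rw [if_pos h', if_pos hh, ih]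
    · have h' : ¬ (h = '.' ∧ ('.' : Char) ∈ t ++ [c]) := by
        intro ⟨h1, h2⟩
        simp only [List.mem_append, List.mem_singleton] at h2
        rcases h2 with h2 | h2
        · exact hh ⟨h1, h2⟩
        · exact hc h2.symm
      rw [if_neg h', if_neg hh, ih, List.cons_append]

lemma ldk_append_dot (l : List Char) :
    ldk (l ++ ['.']) = l.filter (fun x => !(x == '.')) ++ ['.'] := by
  induction l with
  | nil => simp only [List.nil_append, List.filter_nil, ldk]
           rw [if_neg (fun hx => by simp at hx)]
  | cons h t ih =>
    simp only [List.cons_append, ldk, List.filter_cons]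
    by_cases hh : h = '.'
    · have h' : h = '.' ∧ ('.' : Char) ∈ t ++ ['.'] := ⟨hh, by simp⟩
      rw [if_pos h', ih]
      simp [hh]
    · have h' : ¬ (h = '.' ∧ ('.' : Char) ∈ t ++ ['.']) := fun hx => hh hx.1
      rw [if_neg h', ih]
      simp [hh]

lemma filter_big_nondot (l : List Char) :
    (l.filter (fun ch => PySem.Chars.isIn [ch] regFloatAllowed)).filter
      (fun x => !(x == '.')) =
    l.filter (fun c => PySem.Chars.isIn [c] regFloatDigits) := by
  rw [List.filter_filter]
  apply List.filter_congr
  intro c _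
  by_cases hd : c = '.'
  · subst hd
    simp [isIn_dot_digits]
  · have hb : (c == '.') = false := by simp [hd]
    simp [hb, isIn_big_eq_digits c hd]

lemma bRev_reverse (l : List Char) :
    bRev l false =
      (ldk ((l.reverse).filter (fun ch => PySem.Chars.isIn [ch] regFloatAllowed))).reverse := by
  induction l with
  | nil => rfl
  | cons c r ih =>
    have hrev : (c :: r).reverse = r.reverse ++ [c] := by simp
    rw [hrev, List.filter_append]
    by_cases h1 : PySem.Chars.isIn [c] regFloatDigits = true
    · have hc : c ≠ '.' := by
        intro hd; subst hd; exact dot_not_digit ((isIn_single _ _).mp h1)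
      have hbig : PySem.Chars.isIn [c] regFloatAllowed = true := by
        rw [isIn_single, mem_big_iff]; exact Or.inl ((isIn_single _ _).mp h1)
      have hf : List.filter (fun ch => PySem.Chars.isIn [ch] regFloatAllowed) [c] = [c] := by
        simp [hbig]
      rw [hf, ldk_append_nondot _ _ hc, List.reverse_append]
      simp only [bRev]
      rw [if_pos h1, ih]
      rfl
    · by_cases hd : c = '.'
      · subst hd
        have hbig : PySem.Chars.isIn ['.'] regFloatAllowed = true := by
          rw [isIn_single, mem_big_iff]; exact Or.inr rfl
        have hf : List.filter (fun ch => PySem.Chars.isIn [ch] regFloatAllowed) ['.'] = ['.'] := by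
          simp [hbig]
        rw [hf, ldk_append_dot, List.reverse_append]
        simp only [bRev]
        rw [if_neg h1, if_pos (show True ∧ True from ⟨trivial, trivial⟩),
          bRev_true, filter_big_nondot]
        simp [List.filter_reverse]
      · have hbig : ¬ PySem.Chars.isIn [c] regFloatAllowed = true := by
          rw [isIn_single, mem_big_iff]
          rintro (hm | hm)
          · exact h1 ((isIn_single _ _).mpr hm)
          · exact hd hm
        have hf : List.filter (fun ch => PySem.Chars.isIn [ch] regFloatAllowed) [c] = [] := by
          simp only [List.filter_cons, List.filter_nil]
          rw [if_neg hbig]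
        rw [hf, List.append_nil]
        simp only [bRev]
        rw [if_neg h1, if_neg (fun hx => hd hx.1), ih]

-- ===== VERDICT (by name: the statement is the Claim_ definition above) =====
theorem regFloat_spec : Claim_equal_regFloat := by
  intro word _
  unfold Spec_regFloat
  simp only [regFloat, regFloat_alt]
  rw [foldl_step, List.nil_append, removeDots_count, bRev_reverse, List.reverse_reverse,
    List.reverse_reverse]
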